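-- pv_equiv track=rewrite | github.com/dsp-uga/team-void-p1 | src/NaiveBayes_small-sets_No-API.py | predict_id
-- ===== SOURCE A (Python) =====
-- def predict_id(arr):
-- 	l=arr[0]
-- 	index = 0
-- 	for m in range(1,len(arr)):
-- 		if arr[m]>l :
-- 			l=arr[m]
-- 			index = m
-- 	return (index+1)
-- ===== SOURCE B (Python) =====
-- def predict_id(arr):
--     # Stable sort of the indices by descending value; the head is the first
--     # index of the maximum (stability breaks ties toward the smaller index).
--     order = sorted(range(len(arr)), key=lambda i: -arr[i])
--     return order[0] + 1
-- ===== Notes on version B (the rewrite author's own statement) =====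
-- stated objective: alternative
-- what changed: Replaces A's single running-max scan with index bookkeeping by a stable sort of all indices keyed on the negated value, returning the head of the sorted order; stability of sorted gives the same first-occurrence tie-breaking.
import Mathlib
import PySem

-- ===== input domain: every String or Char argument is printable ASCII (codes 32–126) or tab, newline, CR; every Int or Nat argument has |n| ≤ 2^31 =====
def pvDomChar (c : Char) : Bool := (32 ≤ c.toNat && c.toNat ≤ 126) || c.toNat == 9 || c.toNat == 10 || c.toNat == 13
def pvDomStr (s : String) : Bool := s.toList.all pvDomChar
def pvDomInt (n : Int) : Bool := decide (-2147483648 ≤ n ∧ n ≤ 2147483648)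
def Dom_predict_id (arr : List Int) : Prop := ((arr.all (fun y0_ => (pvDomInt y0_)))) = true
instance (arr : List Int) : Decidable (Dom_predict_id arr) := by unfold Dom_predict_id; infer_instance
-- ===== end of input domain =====

-- B replaces A's running-max scan with a stable sort of the indices keyed on the
-- negated value; the head of the sorted order is the first index of the maximum.

-- ===== PORT A =====
-- for m in range(1, len(arr)): indices are always in range, so pyGetD's default 0 is never used;
-- arr[0] on the empty list raises IndexError — excluded by Pre_predict_id.
def predict_id (arr : List Int) : Int :=
  let l := PySem.List.pyGetD arr 0 0
  let st := (PySem.List.pyRange 1 (arr.length : Int) 1).foldl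
    (fun (st : Int × Int) m =>
      if st.1 < PySem.List.pyGetD arr m 0 then (PySem.List.pyGetD arr m 0, m) else st)
    (l, 0)
  st.2 + 1

-- ===== PORT B =====
-- order = sorted(range(len(arr)), key=lambda i: -arr[i]); return order[0] + 1.
-- order[0] on the empty list raises IndexError (pyGetD's default, excluded by Pre_);
-- the indices i are always in range, so the inner pyGetD default is never used.
def predict_id_alt (arr : List Int) : Int :=
  let order := PySem.List.sorted (PySem.List.pyRange 0 (arr.length : Int) 1)
    (fun i => -(PySem.List.pyGetD arr i 0)) false
  PySem.List.pyGetD order 0 0 + 1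

-- ===== PRECONDITION & SPEC =====
-- Pre_ excludes exactly the empty list, on which both Pythons raise IndexError.
def Pre_predict_id (arr : List Int) : Prop := arr ≠ []
instance (arr : List Int) : Decidable (Pre_predict_id arr) := by unfold Pre_predict_id; infer_instance
def pvWitness_predict_id : List Int := ([3, 1, 4, 1, 5])

def Spec_predict_id (arr : List Int) (out : Int) : Prop := out = predict_id_alt arr
instance (arr : List Int) (out : Int) : Decidable (Spec_predict_id arr out) := by unfold Spec_predict_id; infer_instance

-- ===== CLAIM =====
def Claim_equal_predict_id : Prop := ∀ (arr : List Int), Dom_predict_id arr → Pre_predict_id arr → Spec_predict_id arr (predict_id arr)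

-- ===== LEMMAS AND PROOFS =====

-- The common skeleton: fold the candidate step "keep the better index" over a range.
def bestStep (g : Int → Int) (h m : Int) : Int := if g h < g m then m else h

-- A's fold carries (value, index) with value = arr[index]; it projects to the bestStep fold.
theorem foldA_proj (arr : List Int) (L : List Int) : ∀ (i : Int),
    (L.foldl (fun (st : Int × Int) m =>
        if st.1 < PySem.List.pyGetD arr m 0 then (PySem.List.pyGetD arr m 0, m) else st)
      (PySem.List.pyGetD arr i 0, i))
      = (PySem.List.pyGetD arr (L.foldl (bestStep (fun j => PySem.List.pyGetD arr j 0)) i) 0,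
         L.foldl (bestStep (fun j => PySem.List.pyGetD arr j 0)) i) := by
  induction L with
  | nil => intro i; rfl
  | cons x L ih =>
    intro i
    simp only [List.foldl_cons, bestStep]
    split_ifs with hlt
    · exact ih x
    · exact ih i

-- insertBy never returns the empty list.
theorem insertBy_ne_nil {α : Type} (before : α → α → Bool) (x : α) (ys : List α) :
    PySem.List.insertBy before x ys ≠ [] := by
  intro h
  have := (PySem.List.mem_insertBy before x x ys).mpr (Or.inl rfl)
  rw [h] at this
  exact (List.not_mem_nil) this

-- Head of a stable insertion: x goes in front iff it is strictly better than the old head.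
theorem headD_insertBy {α : Type} (before : α → α → Bool) (x h d : α) (t : List α) :
    (PySem.List.insertBy before x (h :: t)).headD d = if before x h then x else h := by
  by_cases hb : before x h = true <;> simp [PySem.List.insertBy, hb]

-- Folding insertBy over L only moves the head, by the head-update rule.
theorem headD_foldl_insertBy {α : Type} (before : α → α → Bool) (d : α) (L : List α) :
    ∀ (acc : List α), acc ≠ [] →
    ((L.foldl (fun acc x => PySem.List.insertBy before x acc) acc).headD d)
      = L.foldl (fun h m => if before m h then m else h) (acc.headD d) := by
  induction L with
  | nil => intro acc _; rfl
  | cons x L ih =>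
    intro acc hne
    obtain ⟨h, t, rfl⟩ := List.exists_cons_of_ne_nil hne
    simp only [List.foldl_cons]
    rw [ih _ (insertBy_ne_nil before x (h :: t)), headD_insertBy]
    rfl

-- xs[0] with default is the head with default.
theorem getD_zero_eq_headD (xs : List Int) (d : Int) : xs.getD 0 d = xs.headD d := by
  cases xs <;> rfl

-- ===== VERDICT =====
theorem predict_id_spec : Claim_equal_predict_id := by
  intro arr _ hpre
  unfold Spec_predict_id
  have hn : (0 : Int) < (arr.length : Int) := by
    cases arr with
    | nil => exact absurd rfl hpre
    | cons a t => simp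
  have hA : predict_id arr
      = (PySem.List.pyRange 1 (arr.length : Int) 1).foldl
          (bestStep (fun j => PySem.List.pyGetD arr j 0)) 0 + 1 := by
    simp only [predict_id]
    rw [show PySem.List.pyGetD arr 0 0 = PySem.List.pyGetD arr (0 : Int) 0 from rfl]
    rw [foldA_proj arr _ 0]
  have hB : predict_id_alt arr
      = (PySem.List.pyRange 1 (arr.length : Int) 1).foldl
          (bestStep (fun j => PySem.List.pyGetD arr j 0)) 0 + 1 := by
    simp only [predict_id_alt]
    rw [PySem.List.sorted_eq_foldl_insertBy, PySem.List.pyRange_one_cons hn]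
    simp only [List.foldl_cons, zero_add, PySem.List.pyGetD_zero]
    rw [getD_zero_eq_headD,
      headD_foldl_insertBy _ 0 _ (PySem.List.insertBy _ 0 []) (insertBy_ne_nil _ 0 [])]
    have hstep : (fun (h m : Int) =>
        if (fun a b => decide (-(PySem.List.pyGetD arr a 0) < -(PySem.List.pyGetD arr b 0))) m h
          = true then m else h)
        = bestStep (fun j => PySem.List.pyGetD arr j 0) := by
      funext h m
      simp [bestStep, neg_lt_neg_iff]
    rw [show ((PySem.List.insertBy
        (fun a b => decide (-(PySem.List.pyGetD arr a 0) < -(PySem.List.pyGetD arr b 0))) 0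
        ([] : List Int)).headD 0) = (0 : Int) from rfl]
    rw [hstep]
  rw [hA, hB]
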